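-- pv_equiv track=rewrite | github.com/aniketk33/LeetcodeSolutions | arrays/largest-3-same-digit.py | largest_digit
-- ===== SOURCE A (Python) =====
-- def largest_digit(num):
--     max_num = 0
--     result = ''
--     left = 0
--
--     for right in range(2, len(num)):
--         curr_window = num[left:right + 1]
--         if len(set(curr_window)) == 1:
--             if int(curr_window) >= max_num:
--                 max_num = int(curr_window)
--                 result = curr_window
--         left += 1
--
--     return result
-- ===== SOURCE B (Python) =====
-- def largest_digit(num):
--     for d in range(9, -1, -1):
--         t = str(d) * 3
--         if t in num:
--             return t
--     return ''
-- ===== Notes on version B (the rewrite author's own statement) =====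
-- stated objective: simpler
-- what changed: Instead of sliding a length-3 window over the string and tracking a running max via int(), B checks membership of the ten fixed candidate triples of a repeated digit, from the largest digit down, and returns the first one found (or the empty string).
-- crash fix: On strings containing a run of three identical non-digit characters (e.g. 'aaa') A raises ValueError via int(); B returns the largest digit triple present, or the empty string if none. — e.g. on largest_digit("aaa"): A raises ValueError, B returns ""
import Mathlib
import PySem

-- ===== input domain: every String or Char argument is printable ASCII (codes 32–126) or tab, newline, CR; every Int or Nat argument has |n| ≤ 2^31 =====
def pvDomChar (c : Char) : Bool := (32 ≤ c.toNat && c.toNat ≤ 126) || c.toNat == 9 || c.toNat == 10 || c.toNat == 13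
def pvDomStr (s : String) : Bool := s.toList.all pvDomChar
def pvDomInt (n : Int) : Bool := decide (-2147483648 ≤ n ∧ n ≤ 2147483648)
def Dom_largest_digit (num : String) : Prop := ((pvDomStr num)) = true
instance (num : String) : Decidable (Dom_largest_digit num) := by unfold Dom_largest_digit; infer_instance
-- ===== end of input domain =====

-- B replaces A's sliding-window max scan by membership tests of the ten fixed repeated-digit triples
-- from the largest digit down (objective: simpler).

-- ===== PORT A =====
-- the body of A's `if len(set(curr_window)) == 1:` block, acting on (max_num, result)
def aStep (st : Int × List Char) (curr : List Char) : Int × List Char :=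
  if (PySem.Set.ofList curr).length == 1 then
    match PySem.Int.ofChars? curr with
    | some v => if v ≥ st.1 then (v, curr) else st
    | none => st  -- here Python's int() raises ValueError; excluded by Pre_
  else st

-- one iteration of A's `for right in range(2, len(num))` loop; state is (max_num, result, left)
def aBody (L : List Char) (st : Int × List Char × Int) (r : Int) : Int × List Char × Int :=
  let curr := PySem.List.slice L (some st.2.2) (some (r + 1))
  let st' := aStep (st.1, st.2.1) curr
  (st'.1, st'.2, st.2.2 + 1)

def largest_digit (num : String) : String :=
  let L := num.toList
  let st := (PySem.List.pyRange 2 (PySem.Str.len num) 1).foldl (aBody L) (0, [], 0)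
  String.ofList st.2.1

-- ===== PORT B =====
-- B's `for d in range(9, -1, -1)` loop: return the first candidate triple contained in num
def altGo (s : List Char) : List Int → List Char
  | [] => []
  | d :: ds =>
    -- t = str(d) * 3  (string repetition, written as the three-fold append)
    let t := PySem.Int.toChars d ++ PySem.Int.toChars d ++ PySem.Int.toChars d
    if PySem.Chars.isIn t s then t else altGo s ds

def largest_digit_alt (num : String) : String :=
  String.ofList (altGo num.toList (PySem.List.pyRange 9 (-1) (-1)))

-- ===== PRECONDITION & SPEC =====
-- Pre_ excludes exactly the strings containing a run of three identical NON-digit characters: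
-- there A's int(curr_window) raises ValueError, so A returns no value.
def Pre_largest_digit (num : String) : Prop :=
  (num.toList.all (fun c => !(PySem.Chars.isIn [c, c, c] num.toList) || c.isDigit)) = true
instance (num : String) : Decidable (Pre_largest_digit num) := by
  unfold Pre_largest_digit; infer_instance

def pvWitness_largest_digit : String := "12 333  999x"

-- On strings containing a run of three identical non-digit characters A raises ValueError via int();
-- B returns the largest digit triple present, or the empty string if none.
def Raises_largest_digit (num : String) : Prop :=
  (num.toList.any (fun c => PySem.Chars.isIn [c, c, c] num.toList && !c.isDigit)) = true
instance (num : String) : Decidable (Raises_largest_digit num) := by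
  unfold Raises_largest_digit; infer_instance

def pvRaiseWitness_largest_digit : String := "aaa"
def pvRaiseWitnessOut_largest_digit : String := ""

def Spec_largest_digit (num : String) (out : String) : Prop := out = largest_digit_alt num
instance (num : String) (out : String) : Decidable (Spec_largest_digit num out) := by
  unfold Spec_largest_digit; infer_instance

-- ===== CLAIM (what is proved, stated in full; the proofs are below) =====
def Claim_equal_largest_digit : Prop :=
  ∀ (num : String), Dom_largest_digit num → Pre_largest_digit num →
    Spec_largest_digit num (largest_digit num)

def Claim_raises_largest_digit : Prop :=
  (∀ (num : String), Dom_largest_digit num → Raises_largest_digit num → ¬ Pre_largest_digit num) ∧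
  (Dom_largest_digit (pvRaiseWitness_largest_digit) ∧
   Raises_largest_digit (pvRaiseWitness_largest_digit) ∧
   largest_digit_alt (pvRaiseWitness_largest_digit) = pvRaiseWitnessOut_largest_digit)

-- ===== LEMMAS AND PROOFS =====

-- the ten candidate digits, in B's descending order
def digitsL : List Int := [9, 8, 7, 6, 5, 4, 3, 2, 1, 0]
def tri (d : Int) : List Char := PySem.Int.toChars d ++ PySem.Int.toChars d ++ PySem.Int.toChars d
def digitOf? (w : List Char) : Option Int := digitsL.find? (fun d => w == tri d)
-- abstract step: the best (max) digit seen so far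
def mstep (b : Option Int) (w : List Char) : Option Int :=
  match digitOf? w with
  | none => b
  | some d => match b with
    | none => some d
    | some a => some (max a d)
-- encode the best digit as A's (max_num, result) state
def enc : Option Int → Int × List Char
  | none => (0, [])
  | some d => (111 * d, tri d)

-- the list of all length-3 windows of L, in order
def triples : List Char → List (List Char)
  | a :: b :: c :: r => [a, b, c] :: triples (b :: c :: r)
  | _ => []

theorem triples_eq_nil {L : List Char} (h : L.length < 3) : triples L = [] := by
  rcases L with _ | ⟨a, _ | ⟨b, _ | ⟨c, r⟩⟩⟩ <;> first | rfl | (simp at h; omega)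

theorem length_of_mem_triples {w : List Char} : ∀ {L : List Char}, w ∈ triples L → w.length = 3 := by
  intro L
  induction L with
  | nil => intro h; simp [triples] at h
  | cons a L' ih =>
    rcases L' with _ | ⟨b, L''⟩
    · intro h; simp [triples] at h
    · rcases L'' with _ | ⟨c, r⟩
      · intro h; simp [triples] at h
      · intro h
        rw [triples] at h
        rcases List.mem_cons.mp h with rfl | h
        · rfl
        · exact ih h

theorem not_mem_short {t L : List Char} (h3 : t.length = 3) (hL : L.length < 3) : ¬ t <:+: L := by
  intro h
  have := h.length_le
  omega

theorem mem_triples_iff {t : List Char} (h3 : t.length = 3) :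
    ∀ {L : List Char}, t ∈ triples L ↔ t <:+: L := by
  intro L
  induction L with
  | nil =>
    rw [triples_eq_nil (by simp)]
    simp only [List.not_mem_nil, false_iff]
    exact not_mem_short h3 (by simp)
  | cons a L' ih =>
    rcases L' with _ | ⟨b, L''⟩
    · rw [triples_eq_nil (by simp)]
      simp only [List.not_mem_nil, false_iff]
      exact not_mem_short h3 (by simp)
    · rcases L'' with _ | ⟨c, r⟩
      · rw [triples_eq_nil (by simp)]
        simp only [List.not_mem_nil, false_iff]
        exact not_mem_short h3 (by simp)
      · rw [triples]
        constructor
        · intro h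
          rcases List.mem_cons.mp h with rfl | h
          · exact List.infix_cons_iff.mpr (Or.inl (by simp))
          · exact List.infix_cons_iff.mpr (Or.inr (ih.mp h))
        · intro hinf
          rcases List.infix_cons_iff.mp hinf with hp | hi
          · obtain ⟨s, hs⟩ := hp
            match t, h3 with
            | [x, y, z], _ =>
              simp at hs
              obtain ⟨rfl, rfl, rfl, -⟩ := hs
              exact List.mem_cons_self
          · exact List.mem_cons_of_mem _ (ih.mpr hi)

-- A's indexed loop over range(2, len) is the fold of aStep over the window list
theorem foldA_transport (L : List Char) :
    ∀ (n k : Nat) (st : Int × List Char), L.length ≤ k + n + 2 →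
    ((PySem.List.pyRange ((k:Int)+2) ((L.length:Int)) 1).foldl (aBody L) (st.1, st.2, (k:Int)))
    = (((triples (L.drop k)).foldl aStep st).1, ((triples (L.drop k)).foldl aStep st).2,
       (k:Int) + ((triples (L.drop k)).length : Int)) := by
  intro n
  induction n with
  | zero =>
    intro k st hle
    rw [PySem.List.pyRange_one_eq_nil (by exact_mod_cast by omega)]
    rw [triples_eq_nil (by simp; omega)]
    simp
  | succ n ih =>
    intro k st hle
    by_cases hlt : L.length ≤ k + 2
    · rw [PySem.List.pyRange_one_eq_nil (by exact_mod_cast by omega)]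
      rw [triples_eq_nil (by simp; omega)]
      simp
    · rw [Nat.not_le] at hlt
      rw [PySem.List.pyRange_one_cons (by exact_mod_cast hlt)]
      rw [List.foldl_cons]
      have hdk3 : 3 ≤ (L.drop k).length := by simp; omega
      obtain ⟨a, b, c, r, hdk⟩ : ∃ a b c r, L.drop k = a :: b :: c :: r := by
        rcases hL : L.drop k with _ | ⟨a, _ | ⟨b, _ | ⟨c, r⟩⟩⟩ <;>
          first
          | (exact ⟨a, b, c, r, rfl⟩)
          | (rw [hL] at hdk3; simp at hdk3)
      have hdk1 : L.drop (k+1) = b :: c :: r := by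
        have : L.drop (k+1) = (L.drop k).drop 1 := by
          rw [List.drop_drop]
        rw [this, hdk]; rfl
      have hbody : aBody L (st.1, st.2, (k:Int)) ((k:Int) + 2)
          = ((aStep st [a,b,c]).1, (aStep st [a,b,c]).2, ((k+1 : Nat) : Int)) := by
        show (_, _, (k:Int)+1) = _
        have hb : ((k:Int) + 2) + 1 = (k:Int) + ((3:Nat):Int) := by push_cast; ring
        rw [hb]
        rw [PySem.List.slice_natCast_add]
        rw [hdk]
        show ((aStep (st.1, st.2) [a,b,c]).1, (aStep (st.1, st.2) [a,b,c]).2, (k:Int)+1) = _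
        simp
      rw [hbody]
      have hrange : PySem.List.pyRange ((k:Int) + 2 + 1) ((L.length:Int)) 1
          = PySem.List.pyRange (((k+1:Nat):Int) + 2) ((L.length:Int)) 1 := by
        push_cast; ring_nf
      rw [hrange, ih (k+1) (aStep st [a,b,c]) (by omega)]
      rw [hdk, hdk1, triples, List.foldl_cons]
      simp only [List.length_cons, Prod.mk.injEq]
      refine ⟨trivial, trivial, ?_⟩
      push_cast; ring

theorem tri_facts : ∀ d ∈ digitsL, PySem.Int.ofChars? (tri d) = some (111*d) ∧
    (PySem.Set.ofList (tri d)).length = 1 ∧ digitOf? (tri d) = some d ∧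
    (tri d).length = 3 ∧ 0 ≤ d ∧ d ≤ 9 := by decide

-- a window is well-behaved: length 3, and if its chars are all equal it is a digit triple
def wOK (w : List Char) : Prop :=
  w.length = 3 ∧ ((PySem.Set.ofList w).length = 1 → ∃ d ∈ digitsL, w = tri d)

theorem digitOf?_eq_some {w : List Char} {d : Int} (h : digitOf? w = some d) :
    d ∈ digitsL ∧ w = tri d := by
  refine ⟨List.mem_of_find?_eq_some h, ?_⟩
  have := List.find?_some h
  simpa using this

theorem aStep_enc (b : Option Int) (hb : ∀ d, b = some d → d ∈ digitsL)
    (w : List Char) (hw : wOK w) : aStep (enc b) w = enc (mstep b w) := by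
  by_cases h1 : (PySem.Set.ofList w).length = 1
  · obtain ⟨d, hd, rfl⟩ := hw.2 h1
    obtain ⟨hof, hset, hdig, -, hd0, -⟩ := tri_facts d hd
    rw [mstep, hdig]
    rcases b with _ | a
    · rw [aStep]
      simp only [hset, hof]
      norm_num
      rw [if_pos (by simp [enc]; omega)]
      rfl
    · have ha : a ∈ digitsL := hb a rfl
      obtain ⟨-, -, -, -, ha0, ha9⟩ := tri_facts a ha
      rw [aStep]
      simp only [hset, hof]
      norm_num
      show (if 111 * a ≤ 111 * d then _ else _) = _
      by_cases hc : 111 * a ≤ 111 * d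
      · rw [if_pos hc]
        have : max a d = d := by omega
        simp [enc, this]
      · rw [if_neg hc]
        have : max a d = a := by omega
        simp [enc, this]
  · have hno : digitOf? w = none := by
      rcases hdo : digitOf? w with _ | d
      · rfl
      · obtain ⟨hd, rfl⟩ := digitOf?_eq_some hdo
        exact absurd (tri_facts d hd).2.1 h1
    rw [mstep, hno, aStep]
    simp [h1]

theorem mstep_mem {b : Option Int} (hb : ∀ d, b = some d → d ∈ digitsL) (w : List Char) :
    ∀ d, mstep b w = some d → d ∈ digitsL := by
  intro d h
  rw [mstep] at h
  rcases hdo : digitOf? w with _ | e <;> rw [hdo] at h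
  · exact hb d h
  · rcases b with _ | a
    · cases h; exact (digitOf?_eq_some hdo).1
    · have : d = max a e := by cases h; rfl
      subst this
      rcases max_choice a e with h' | h' <;> rw [h']
      · exact hb a rfl
      · exact (digitOf?_eq_some hdo).1

theorem fold_enc : ∀ (ws : List (List Char)) (b : Option Int),
    (∀ w ∈ ws, wOK w) → (∀ d, b = some d → d ∈ digitsL) →
    ws.foldl aStep (enc b) = enc (ws.foldl mstep b) := by
  intro ws
  induction ws with
  | nil => intros; rfl
  | cons w ws ih =>
    intro b hws hb
    rw [List.foldl_cons, List.foldl_cons, aStep_enc b hb w (hws w List.mem_cons_self)]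
    exact ih (mstep b w) (fun w' hw' => hws w' (List.mem_cons_of_mem _ hw')) (mstep_mem hb w)

theorem mfold_some : ∀ (ws : List (List Char)) (b : Option Int) (m : Int),
    ws.foldl mstep b = some m → (b = some m ∨ ∃ w ∈ ws, digitOf? w = some m) := by
  intro ws
  induction ws with
  | nil => intro b m h; exact Or.inl h
  | cons w ws ih =>
    intro b m h
    rw [List.foldl_cons] at h
    rcases ih (mstep b w) m h with h' | ⟨w', hw', hd⟩
    · rw [mstep] at h'
      rcases hdo : digitOf? w with _ | e <;> rw [hdo] at h'
      · exact Or.inl h'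
      · rcases b with _ | a
        · right; exact ⟨w, List.mem_cons_self, by rw [hdo]; cases h'; rfl⟩
        · have hm : m = max a e := by cases h'; rfl
          rcases max_choice a e with h2 | h2
          · left; rw [hm, h2]
          · right; exact ⟨w, List.mem_cons_self, by rw [hdo, hm, h2]⟩
    · exact Or.inr ⟨w', List.mem_cons_of_mem _ hw', hd⟩

theorem mstep_ge (a : Int) (w : List Char) :
    ∃ a', mstep (some a) w = some a' ∧ a ≤ a' := by
  rw [mstep]
  rcases hdo : digitOf? w with _ | e
  · exact ⟨a, rfl, le_refl a⟩
  · exact ⟨max a e, rfl, le_max_left a e⟩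

theorem mstep_of_digit {w : List Char} {d : Int} (b : Option Int) (hd : digitOf? w = some d) :
    ∃ a', mstep b w = some a' ∧ d ≤ a' := by
  rw [mstep, hd]
  rcases b with _ | a
  · exact ⟨d, rfl, le_refl d⟩
  · exact ⟨max a d, rfl, le_max_right a d⟩

theorem mfold_ge : ∀ (ws : List (List Char)) (b : Option Int) (d : Int),
    (b = some d ∨ ∃ w ∈ ws, digitOf? w = some d) →
    ∃ m, ws.foldl mstep b = some m ∧ d ≤ m := by
  intro ws
  induction ws with
  | nil =>
    intro b d h
    rcases h with h | ⟨w, hw, -⟩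
    · exact ⟨d, h, le_refl d⟩
    · simp at hw
  | cons w ws ih =>
    intro b d h
    rw [List.foldl_cons]
    rcases h with rfl | ⟨w', hw', hd⟩
    · obtain ⟨a', ha', hle⟩ := mstep_ge d w
      obtain ⟨m, hm, hle'⟩ := ih (mstep (some d) w) a' (Or.inl ha')
      exact ⟨m, hm, le_trans hle hle'⟩
    · rcases List.mem_cons.mp hw' with rfl | hw''
      · obtain ⟨a', ha', hle⟩ := mstep_of_digit b hd
        obtain ⟨m, hm, hle'⟩ := ih (mstep b w') a' (Or.inl ha')
        exact ⟨m, hm, le_trans hle hle'⟩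
      · exact ih (mstep b w) d (Or.inr ⟨w', hw'', hd⟩)

theorem find?_desc {ds : List Int} {Q : Int → Bool} (hs : ds.Pairwise (· > ·)) {m : Int}
    (hm : m ∈ ds) (hQ : Q m = true) (hmax : ∀ d ∈ ds, Q d = true → d ≤ m) :
    ds.find? Q = some m := by
  induction ds with
  | nil => simp at hm
  | cons e tl ih =>
    rcases List.mem_cons.mp hm with rfl | hm'
    · simp [hQ]
    · have hgt : e > m := (List.pairwise_cons.mp hs).1 m hm'
      have hQe : Q e = false := by
        by_contra h
        have := hmax e List.mem_cons_self (by simpa using h)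
        omega
      rw [List.find?_cons, hQe]
      exact ih (List.pairwise_cons.mp hs).2 hm' (fun d hd => hmax d (List.mem_cons_of_mem _ hd))

theorem digit_char_tri (c : Char) (h : c.isDigit = true) :
    ∃ d ∈ digitsL, PySem.Int.toChars d = [c] := by
  simp [Char.isDigit] at h
  obtain ⟨h1, h2⟩ := h
  have h1' : 48 ≤ c.toNat := h1
  have h2' : c.toNat ≤ 57 := h2
  have hv : c = Char.ofNat c.toNat := (Char.ofNat_toNat c).symm
  have hk : c.toNat = 48 ∨ c.toNat = 49 ∨ c.toNat = 50 ∨ c.toNat = 51 ∨ c.toNat = 52 ∨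
      c.toNat = 53 ∨ c.toNat = 54 ∨ c.toNat = 55 ∨ c.toNat = 56 ∨ c.toNat = 57 := by omega
  rcases hk with h3|h3|h3|h3|h3|h3|h3|h3|h3|h3 <;> rw [hv, h3] <;> decide

theorem set_one {w : List Char} (h3 : w.length = 3)
    (h1 : (PySem.Set.ofList w).length = 1) : ∃ c, w = [c, c, c] := by
  match w, h3 with
  | [a, b, c], _ =>
    have ha : a ∈ PySem.Set.ofList [a,b,c] := by simp [PySem.Set.mem_ofList]
    have hb : b ∈ PySem.Set.ofList [a,b,c] := by simp [PySem.Set.mem_ofList]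
    have hc : c ∈ PySem.Set.ofList [a,b,c] := by simp [PySem.Set.mem_ofList]
    obtain ⟨x, hx⟩ := List.length_eq_one_iff.mp h1
    rw [hx] at ha hb hc
    simp at ha hb hc
    exact ⟨x, by simp [ha, hb, hc]⟩

theorem wOK_of_pre {num : String} (hpre : Pre_largest_digit num) :
    ∀ w ∈ triples num.toList, wOK w := by
  intro w hw
  have h3 : w.length = 3 := length_of_mem_triples hw
  refine ⟨h3, fun h1 => ?_⟩
  obtain ⟨c, rfl⟩ := set_one h3 h1
  have hinf : [c, c, c] <:+: num.toList := (mem_triples_iff h3).mp hw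
  have hcmem : c ∈ num.toList := hinf.subset (by simp)
  have hIn : PySem.Chars.isIn [c, c, c] num.toList = true :=
    (PySem.Chars.isIn_iff_infix _ _).mpr hinf
  have hdig : c.isDigit = true := by
    have h := List.all_eq_true.mp hpre c hcmem
    simp [hIn] at h
    exact h
  obtain ⟨d, hd, hdc⟩ := digit_char_tri c hdig
  exact ⟨d, hd, by rw [tri, hdc]; rfl⟩

theorem altGo_eq (L : List Char) : ∀ ds : List Int,
    altGo L ds = (match ds.find? (fun d => PySem.Chars.isIn (tri d) L) with
      | some d => tri d | none => []) := by
  intro ds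
  induction ds with
  | nil => rfl
  | cons d ds ih =>
    rw [altGo]
    show (if PySem.Chars.isIn (tri d) L then tri d else altGo L ds) = _
    rcases h : PySem.Chars.isIn (tri d) L with _ | _
    · rw [if_neg (by simp), List.find?_cons, h, ih]
    · rw [if_pos (by simp), List.find?_cons, h]

theorem pyRange_digits : PySem.List.pyRange 9 (-1) (-1) = digitsL := by decide

theorem digits_pairwise : digitsL.Pairwise (· > ·) := by decide

-- main equivalence on lists
theorem main_eq (num : String) (hpre : Pre_largest_digit num) :
    largest_digit num = largest_digit_alt num := by
  rw [largest_digit, largest_digit_alt]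
  rw [pyRange_digits, altGo_eq]
  have hlen : PySem.Str.len num = ((num.toList.length : Nat) : Int) := by
    simp [PySem.Str.len_eq]
  have h2 : (2 : Int) = ((0 : Nat) : Int) + 2 := by norm_num
  have hinit : ((0 : Int), ([] : List Char), (0 : Int))
      = (((0 : Int), ([] : List Char)).1, ((0 : Int), ([] : List Char)).2, ((0 : Nat) : Int)) := rfl
  rw [hlen, h2, hinit, foldA_transport num.toList num.toList.length 0 (0, []) (by omega)]
  rw [List.drop_zero]
  have henc : ((0 : Int), ([] : List Char)) = enc none := rfl
  rw [henc, fold_enc (triples num.toList) none (wOK_of_pre hpre) (by intro d h; cases h)]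
  rcases hM : (triples num.toList).foldl mstep none with _ | m
  · -- no digit triple anywhere
    rw [List.find?_eq_none.mpr ?_]
    · rfl
    · intro d hd hIn
      have hinf : tri d <:+: num.toList := (PySem.Chars.isIn_iff_infix _ _).mp hIn
      have hmem : tri d ∈ triples num.toList :=
        (mem_triples_iff (tri_facts d hd).2.2.2.1).mpr hinf
      obtain ⟨m, hm, -⟩ := mfold_ge (triples num.toList) none d
        (Or.inr ⟨tri d, hmem, (tri_facts d hd).2.2.1⟩)
      rw [hM] at hm
      cases hm
  · rcases mfold_some (triples num.toList) none m hM with h | ⟨w, hw, hd⟩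
    · cases h
    · obtain ⟨hmD, rfl⟩ := digitOf?_eq_some hd
      have hQm : PySem.Chars.isIn (tri m) num.toList = true :=
        (PySem.Chars.isIn_iff_infix _ _).mpr ((mem_triples_iff (tri_facts m hmD).2.2.2.1).mp hw)
      have hmax : ∀ d ∈ digitsL, PySem.Chars.isIn (tri d) num.toList = true → d ≤ m := by
        intro d hdD hIn
        have hinf : tri d <:+: num.toList := (PySem.Chars.isIn_iff_infix _ _).mp hIn
        have hmem : tri d ∈ triples num.toList :=
          (mem_triples_iff (tri_facts d hdD).2.2.2.1).mpr hinf
        obtain ⟨m', hm', hle⟩ := mfold_ge (triples num.toList) none d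
          (Or.inr ⟨tri d, hmem, (tri_facts d hdD).2.2.1⟩)
        rw [hM] at hm'
        cases hm'
        exact hle
      rw [find?_desc digits_pairwise hmD hQm hmax]
      rfl

-- ===== VERDICT (by name: the statement is the Claim_ definition above) =====
theorem largest_digit_spec : Claim_equal_largest_digit := by
  intro num _ hpre
  unfold Spec_largest_digit
  exact main_eq num hpre

theorem largest_digit_raises : Claim_raises_largest_digit := by
  unfold Claim_raises_largest_digit
  refine ⟨?_, by set_option maxRecDepth 8192 in decide⟩
  intro num _ hr hpre
  obtain ⟨c, hc, hb⟩ := List.any_eq_true.mp hr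
  have h := List.all_eq_true.mp hpre c hc
  simp at hb h
  rcases h with h | h
  · rw [hb.1] at h; cases h
  · rw [hb.2] at h; cases h

-- self-check: the raise witness really lies inside Raises_
theorem largest_digit_raises_ok : Raises_largest_digit pvRaiseWitness_largest_digit :=
  largest_digit_raises.2.2.1
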